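-- pv_equiv track=rewrite | github.com/fivefivekai666/nanoclaw | memory/file.py | _extract_effective_lines
-- ===== SOURCE A (Python) =====
-- def _extract_effective_lines(raw_text: str) -> list[str]:
--     """从原始 MEMORY.md 中提取最小有效内容块。"""
--     lines = raw_text.splitlines()
--     cleaned_lines: list[str] = []
--     title_removed = False
--     previous_was_blank = False
--
--     for line in lines:
--         stripped = line.strip()
--
--         # 去掉最外层标题，例如：# MEMORY.md
--         if not title_removed and stripped.lower() == "# memory.md":
--             title_removed = True
--             continue
--
--         # 去掉纯 HTML 注释行
--         if stripped.startswith("<!--") and stripped.endswith("-->"):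
--             continue
--
--         # 压缩连续空行
--         if stripped == "":
--             if cleaned_lines and not previous_was_blank:
--                 cleaned_lines.append("")
--             previous_was_blank = True
--             continue
--
--         cleaned_lines.append(line.rstrip())
--         previous_was_blank = False
--
--     while cleaned_lines and cleaned_lines[0] == "":
--         cleaned_lines.pop(0)
--     while cleaned_lines and cleaned_lines[-1] == "":
--         cleaned_lines.pop()
--
--     return cleaned_lines
-- ===== SOURCE B (Python) =====
-- def _extract_effective_lines(raw_text: str) -> list[str]:
--     # Pass 1: drop the first '# memory.md' title line and HTML-comment lines;
--     # map each survivor to '' if blank else its rstrip.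
--     kept = []
--     title_removed = False
--     for line in raw_text.splitlines():
--         s = line.strip()
--         if not title_removed and s.lower() == "# memory.md":
--             title_removed = True
--             continue
--         if s.startswith("<!--") and s.endswith("-->"):
--             continue
--         kept.append("" if s == "" else line.rstrip())
--
--     # Pass 2: collapse each run of consecutive blanks to a single blank.
--     collapsed = [x for prev, x in zip([None] + kept, kept) if x != "" or prev != ""]
--
--     # Pass 3: after collapsing, at most one blank can sit at each end; slice it off.
--     if collapsed and collapsed[0] == "":
--         collapsed = collapsed[1:]
--     if collapsed and collapsed[-1] == "":
--         collapsed = collapsed[:-1]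
--     return collapsed
-- ===== Notes on version B (the rewrite author's own statement) =====
-- stated objective: alternative
-- what changed: Replaced A's single stateful loop (previous_was_blank flag, conditional in-loop blank insertion, then two trimming while-pop loops) by separate passes: a filter/map pass producing the cleaned lines, a zip-with-predecessor comprehension collapsing blank runs, and a slice trim removing the single possible blank at each end.
import Mathlib
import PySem

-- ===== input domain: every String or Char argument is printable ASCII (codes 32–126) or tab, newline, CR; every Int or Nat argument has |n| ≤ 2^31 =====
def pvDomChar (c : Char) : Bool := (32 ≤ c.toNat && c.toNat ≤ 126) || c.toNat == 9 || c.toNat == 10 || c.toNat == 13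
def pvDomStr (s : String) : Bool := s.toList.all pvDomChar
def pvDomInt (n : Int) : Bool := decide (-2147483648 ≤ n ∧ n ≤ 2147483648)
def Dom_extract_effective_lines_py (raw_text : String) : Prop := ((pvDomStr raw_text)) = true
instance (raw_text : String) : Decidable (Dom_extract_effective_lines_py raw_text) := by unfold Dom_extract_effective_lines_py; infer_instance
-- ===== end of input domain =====

-- B restructures A's single stateful loop into separate filter/map, blank-run-collapse and
-- end-trim passes; same output, no speed claim (objective: alternative).

-- ===== PORT A =====
-- the body of A's for-loop, on state (cleaned_lines, title_removed, previous_was_blank)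
def aStep (st : List String × Bool × Bool) (line : String) : List String × Bool × Bool :=
  let cleaned := st.1
  let title_removed := st.2.1
  let previous_was_blank := st.2.2
  let stripped := PySem.Str.strip line
  if !title_removed && (PySem.Str.lower stripped == "# memory.md") then
    (cleaned, true, previous_was_blank)
  else if PySem.Str.startswith stripped "<!--" && PySem.Str.endswith stripped "-->" then
    (cleaned, title_removed, previous_was_blank)
  else if stripped == "" then
    (if !cleaned.isEmpty && !previous_was_blank then cleaned ++ [""] else cleaned,
     title_removed, true)
  else
    (cleaned ++ [PySem.Str.rstrip line], title_removed, false)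

-- 'while cleaned and cleaned[0] == "": cleaned.pop(0)' (also applied to the reversed list
-- for the trailing 'while cleaned and cleaned[-1] == "": cleaned.pop()')
def pyTrimFront : List String → List String
  | [] => []
  | x :: xs => if x == "" then pyTrimFront xs else x :: xs

def extract_effective_lines_py (raw_text : String) : List String :=
  let lines := PySem.Str.splitlines raw_text
  let st := lines.foldl aStep ([], false, false)
  (pyTrimFront ((pyTrimFront st.1).reverse)).reverse

-- ===== PORT B =====
-- B's pass 1: drop the one-shot title line and comment lines, map blank → "", other → rstrip
def altKept : Bool → List String → List String
  | _, [] => []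
  | title_removed, line :: rest =>
    let s := PySem.Str.strip line
    if !title_removed && (PySem.Str.lower s == "# memory.md") then altKept true rest
    else if PySem.Str.startswith s "<!--" && PySem.Str.endswith s "-->" then
      altKept title_removed rest
    else (if s == "" then "" else PySem.Str.rstrip line) :: altKept title_removed rest

def extract_effective_lines_py_alt (raw_text : String) : List String :=
  let kept := altKept false (PySem.Str.splitlines raw_text)
  -- pass 2: zip-with-predecessor comprehension dropping a blank that follows a blank
  let collapsed := (List.zip ((none : Option String) :: kept.map some) kept).filterMap
      (fun px => if px.2 != "" || px.1 != some "" then some px.2 else none)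
  -- pass 3: slice off the single possible blank at each end
  let collapsed :=
    if !collapsed.isEmpty && (PySem.List.pyGetD collapsed 0 "" == "") then
      PySem.List.slice collapsed (some 1) none
    else collapsed
  if !collapsed.isEmpty && (PySem.List.pyGetD collapsed (-1) "" == "") then
    PySem.List.slice collapsed none (some (-1))
  else collapsed

-- ===== PRECONDITION & SPEC =====
def Spec_extract_effective_lines_py (raw_text : String) (out : List String) : Prop := out = extract_effective_lines_py_alt raw_text
instance (raw_text : String) (out : List String) : Decidable (Spec_extract_effective_lines_py raw_text out) := by unfold Spec_extract_effective_lines_py; infer_instance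

-- ===== CLAIM (what is proved, stated in full; the proofs are below) =====
def Claim_equal_extract_effective_lines_py : Prop := ∀ (raw_text : String), Dom_extract_effective_lines_py raw_text → Spec_extract_effective_lines_py raw_text (extract_effective_lines_py raw_text)

-- ===== LEMMAS AND PROOFS =====

-- collapse of blank runs, parameterised by "previous was blank"
def cF : Bool → List String → List String
  | _, [] => []
  | pb, x :: xs =>
    if x = "" then (if pb then cF true xs else "" :: cF true xs)
    else x :: cF false xs

lemma rstrip_ne_empty (line : String) (h : ¬ PySem.Str.strip line = "") :
    ¬ PySem.Str.rstrip line = "" := by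
  intro hr
  apply h
  have hr' : List.dropWhile PySem.Chars.isspace line.toList.reverse = [] := by
    have := congrArg String.toList hr
    simpa [PySem.Str.rstrip, PySem.Chars.rstrip] using this
  have hall : ∀ c ∈ line.toList, PySem.Chars.isspace c := by
    intro c hc
    exact (List.dropWhile_eq_nil_iff.1 hr') c (List.mem_reverse.2 hc)
  have hl : PySem.Chars.lstrip line.toList = [] := by
    simp [PySem.Chars.lstrip, List.dropWhile_eq_nil_iff]
    exact fun c hc => hall c hc
  simp [PySem.Str.strip, PySem.Chars.strip, hl, PySem.Chars.rstrip]

lemma cF_true_head : ∀ M : List String, (cF true M).head? ≠ some "" := by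
  intro M
  induction M with
  | nil => simp [cF]
  | cons x xs ih =>
    by_cases hx : x = ""
    · simp [cF, hx]
      exact fun h => ih (by simp [h])
    · simp [cF, hx]

-- A's loop, characterised by cF over B's kept lines
lemma loopA : ∀ (lines acc : List String) (tr pb : Bool),
    (List.foldl aStep (acc, tr, pb) lines).1
      = acc ++ (if acc = [] then cF true (altKept tr lines) else cF pb (altKept tr lines)) := by
  intro lines
  induction lines with
  | nil => intro acc tr pb; by_cases h : acc = [] <;> simp [altKept, cF, h]
  | cons line rest ih =>
    intro acc tr pb
    rw [List.foldl_cons]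
    by_cases h1 : (!tr && (PySem.Str.lower (PySem.Str.strip line) == "# memory.md")) = true
    · rw [show aStep (acc, tr, pb) line = (acc, true, pb) by
        simp only [aStep]; rw [if_pos h1]]
      rw [show altKept tr (line :: rest) = altKept true rest by
        simp only [altKept]; rw [if_pos h1]]
      exact ih acc true pb
    · by_cases h2 : (PySem.Str.startswith (PySem.Str.strip line) "<!--"
          && PySem.Str.endswith (PySem.Str.strip line) "-->") = true
      · rw [show aStep (acc, tr, pb) line = (acc, tr, pb) by
          simp only [aStep]; rw [if_neg h1, if_pos h2]]
        rw [show altKept tr (line :: rest) = altKept tr rest by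
          simp only [altKept]; rw [if_neg h1, if_pos h2]]
        exact ih acc tr pb
      · by_cases h3 : PySem.Str.strip line = ""
        · have h3' : (PySem.Str.strip line == "") = true := by simpa using h3
          rw [show altKept tr (line :: rest) = "" :: altKept tr rest by
            simp only [altKept]; rw [if_neg h1, if_neg h2, if_pos h3']]
          rw [show aStep (acc, tr, pb) line
              = (if !acc.isEmpty && !pb then acc ++ [""] else acc, tr, true) by
            simp only [aStep]; rw [if_neg h1, if_neg h2, if_pos h3']]
          by_cases ha : acc = []
          · subst ha
            simpa [cF] using ih [] tr true
          · cases pb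
            · rw [if_pos (by simp [ha])]
              have := ih (acc ++ [""]) tr true
              rw [if_neg (by simp)] at this
              rw [this, if_neg ha]
              simp [cF]
            · rw [if_neg (by simp)]
              have := ih acc tr true
              rw [if_neg ha] at this
              rw [this, if_neg ha]
              simp [cF]
        · have hv : ¬ PySem.Str.rstrip line = "" := rstrip_ne_empty line h3
          have h3' : ¬ (PySem.Str.strip line == "") = true := by simpa using h3
          rw [show altKept tr (line :: rest)
              = PySem.Str.rstrip line :: altKept tr rest by
            simp only [altKept]; rw [if_neg h1, if_neg h2, if_neg h3']]
          rw [show aStep (acc, tr, pb) line = (acc ++ [PySem.Str.rstrip line], tr, false) by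
            simp only [aStep]; rw [if_neg h1, if_neg h2, if_neg h3']]
          have := ih (acc ++ [PySem.Str.rstrip line]) tr false
          rw [if_neg (by simp)] at this
          rw [this]
          by_cases ha : acc = [] <;> simp [ha, cF, hv]

-- B's zip-with-predecessor collapse is cF
lemma zip_collapse : ∀ (ks : List String) (p : Option String),
    ((List.zip (p :: ks.map some) ks).filterMap
      (fun px => if px.2 != "" || px.1 != some "" then some px.2 else none))
      = cF (p == some "") ks := by
  intro ks
  induction ks with
  | nil => intro p; simp [cF]
  | cons k t ih =>
    intro p
    rw [List.map_cons, List.zip_cons_cons, List.filterMap_cons]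
    by_cases hk : k = ""
    · subst hk
      by_cases hp : p = some ""
      · subst hp
        simpa [cF] using ih (some "")
      · have : (("" : String) != "" || p != some "") = true := by
          simp [hp]
        rw [if_pos this]
        rw [ih (some "")]
        simp [cF, hp]
    · have : ((k : String) != "" || p != some "") = true := by simp [hk]
      rw [if_pos this]
      rw [ih (some k), show ((some k == some "")) = false from by simp [hk]]
      simp [cF, hk]

lemma trimFront_cF : ∀ M : List String,
    pyTrimFront (cF true M) = cF true M ∧ pyTrimFront (cF false M) = cF true M := by
  intro M
  induction M with
  | nil => simp [cF, pyTrimFront]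
  | cons x xs ih =>
    by_cases hx : x = "" <;> simp [cF, hx, pyTrimFront, ih.1]

lemma cF_chain : ∀ (pb : Bool) (M : List String),
    List.IsChain (fun a b => ¬(a = "" ∧ b = "")) (cF pb M) := by
  intro pb M
  induction M generalizing pb with
  | nil => simp [cF]
  | cons x xs ih =>
    by_cases hx : x = ""
    · cases pb
      · rw [show cF false (x::xs) = "" :: cF true xs by simp [cF, hx]]
        refine List.IsChain.cons (ih true) ?_
        intro y hy hcon
        rw [Option.mem_def] at hy
        exact cF_true_head xs (by rw [hy, hcon.2])
      · simpa [cF, hx] using ih true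
    · simp only [cF, if_neg hx]
      exact List.IsChain.cons (ih false) (fun y _ hcon => hx hcon.1)

-- one-step front trim equals the while-trim on a list with no adjacent blanks
lemma trimFront_of_chain (r : List String)
    (h : List.IsChain (fun a b : String => ¬(a = "" ∧ b = "")) r) :
    pyTrimFront r = if r.head? = some "" then r.tail else r := by
  match r with
  | [] => simp [pyTrimFront]
  | x :: t =>
    by_cases hx : x = ""
    · subst hx
      simp only [pyTrimFront, List.head?_cons, List.tail_cons, beq_self_eq_true]
      match t with
      | [] => simp [pyTrimFront]
      | y :: u =>
        have hy : ¬ y = "" := by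
          have := List.IsChain.rel_head h
          exact fun hy' => this ⟨rfl, hy'⟩
        simp [pyTrimFront, hy]
    · simp [pyTrimFront, hx]

-- the B-side front slice step, on cF false
lemma front_step (M : List String) :
    (if !((cF false M).isEmpty) && (PySem.List.pyGetD (cF false M) 0 "" == "") then
        PySem.List.slice (cF false M) (some 1) none
      else cF false M) = cF true M := by
  match M with
  | [] => simp [cF]
  | x :: xs =>
    by_cases hx : x = ""
    · rw [show cF false (x::xs) = "" :: cF true xs by simp [cF, hx]]
      rw [show cF true (x::xs) = cF true xs by simp [cF, hx]]
      rw [if_pos (by simp [PySem.List.pyGetD_zero_cons])]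
      simp [PySem.List.slice_from_one]
    · rw [show cF false (x::xs) = x :: cF false xs by simp [cF, hx]]
      rw [show cF true (x::xs) = x :: cF false xs by simp [cF, hx]]
      rw [if_neg (by simp [PySem.List.pyGetD_zero_cons, hx])]

-- the B-side back slice step equals A's reversed while-trim, on a no-adjacent-blanks list
lemma back_step (L : List String)
    (h : List.IsChain (fun a b : String => ¬(a = "" ∧ b = "")) L) :
    (if !(L.isEmpty) && (PySem.List.pyGetD L (-1) "" == "") then
        PySem.List.slice L none (some (-1))
      else L) = (pyTrimFront L.reverse).reverse := by
  have hrev : List.IsChain (fun a b : String => ¬(a = "" ∧ b = "")) L.reverse :=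
    List.isChain_reverse.mpr (by
      refine h.imp ?_
      exact fun a b hab hcon => hab ⟨hcon.2, hcon.1⟩)
  rw [trimFront_of_chain _ hrev, List.head?_reverse]
  by_cases hne : L = []
  · subst hne; simp
  · by_cases hlast : L.getLast? = some ""
    · have hg : L.getLast hne = "" := by
        rw [List.getLast?_eq_some_getLast hne] at hlast
        exact Option.some.inj hlast
      have hguard : (!(L.isEmpty) && (PySem.List.pyGetD L (-1) "" == "")) = true := by
        simp only [Bool.and_eq_true, Bool.not_eq_true']
        exact ⟨by simp [hne], by simp [pysem, hne, hg]⟩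
      rw [if_pos hguard, if_pos hlast, PySem.List.slice_to_neg_one]
      simp [List.tail_reverse]
    · have hguard : ¬ (!(L.isEmpty) && (PySem.List.pyGetD L (-1) "" == "")) = true := by
        simp only [Bool.and_eq_true, Bool.not_eq_true']
        rintro ⟨-, hb⟩
        apply hlast
        simp [pysem, hne] at hb
        rw [List.getLast?_eq_some_getLast hne, hb]
      rw [if_neg hguard, if_neg hlast, List.reverse_reverse]

-- ===== VERDICT (by name: the statement is the Claim_ definition above) =====
theorem extract_effective_lines_py_spec : Claim_equal_extract_effective_lines_py := by
  intro raw_text _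
  unfold Spec_extract_effective_lines_py extract_effective_lines_py extract_effective_lines_py_alt
  dsimp only []
  have hA := loopA (PySem.Str.splitlines raw_text) [] false false
  rw [if_pos rfl] at hA
  rw [hA, List.nil_append]
  set M := altKept false (PySem.Str.splitlines raw_text) with hM
  rw [zip_collapse M none]
  rw [show ((none : Option String) == some "") = false from rfl]
  rw [front_step M]
  rw [(trimFront_cF M).1]
  rw [back_step (cF true M) (cF_chain true M)]
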